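-- pv_equiv track=rewrite | github.com/chianyou/UCL-Data-Engineering-Group-Assignment | src/transformation/build_star_schema.py | build_dim_cwe
-- ===== SOURCE A (Python) =====
-- from typing import Any
--
-- def build_dim_cwe(
--     vulnerability_rows: list[dict[str, str]], problem_type_rows: list[dict[str, str]]
-- ) -> list[dict[str, Any]]:
--     descriptions_by_cwe: dict[str, set[str]] = {}
--
--     for row in problem_type_rows:
--         cwe_id = (row.get("cwe_id") or "").strip()
--         description = (row.get("description") or "").strip()
--         if not cwe_id:
--             continue
--         descriptions_by_cwe.setdefault(cwe_id, set())
--         if description: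
--             descriptions_by_cwe[cwe_id].add(description)
--
--     cwe_ids = {
--         (row.get("cwe_id") or "").strip()
--         for row in vulnerability_rows
--         if (row.get("cwe_id") or "").strip()
--     }
--     cwe_ids.update(descriptions_by_cwe.keys())
--
--     rows: list[dict[str, Any]] = []
--     for cwe_id in sorted(cwe_ids):
--         descriptions = sorted(descriptions_by_cwe.get(cwe_id, set()))
--         rows.append(
--             {
--                 "cwe_key": cwe_id,
--                 "cwe_name": cwe_id,
--                 "cwe_description": " | ".join(descriptions),
--             }
--         )
--     return rows
-- ===== SOURCE B (Python) =====
-- def build_dim_cwe(vulnerability_rows, problem_type_rows):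
--     def sid(row):
--         return (row.get("cwe_id") or "").strip()
--
--     ids = {sid(r) for r in problem_type_rows} | {sid(r) for r in vulnerability_rows}
--     ids.discard("")
--
--     def description_of(cwe_id):
--         ds = {(r.get("description") or "").strip()
--               for r in problem_type_rows if sid(r) == cwe_id}
--         ds.discard("")
--         return " | ".join(sorted(ds))
--
--     return [
--         {"cwe_key": cwe_id, "cwe_name": cwe_id, "cwe_description": description_of(cwe_id)}
--         for cwe_id in sorted(ids)
--     ]
-- ===== Notes on version B (the rewrite author's own statement) =====
-- stated objective: simpler
-- what changed: A's single-pass dict-of-sets aggregation (setdefault + mutable set per key) is replaced by a dict-free decomposition: build the sorted set of nonempty stripped ids once, then recompute each id's deduplicated descriptions by a direct rescan of problem_type_rows.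
import Mathlib
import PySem

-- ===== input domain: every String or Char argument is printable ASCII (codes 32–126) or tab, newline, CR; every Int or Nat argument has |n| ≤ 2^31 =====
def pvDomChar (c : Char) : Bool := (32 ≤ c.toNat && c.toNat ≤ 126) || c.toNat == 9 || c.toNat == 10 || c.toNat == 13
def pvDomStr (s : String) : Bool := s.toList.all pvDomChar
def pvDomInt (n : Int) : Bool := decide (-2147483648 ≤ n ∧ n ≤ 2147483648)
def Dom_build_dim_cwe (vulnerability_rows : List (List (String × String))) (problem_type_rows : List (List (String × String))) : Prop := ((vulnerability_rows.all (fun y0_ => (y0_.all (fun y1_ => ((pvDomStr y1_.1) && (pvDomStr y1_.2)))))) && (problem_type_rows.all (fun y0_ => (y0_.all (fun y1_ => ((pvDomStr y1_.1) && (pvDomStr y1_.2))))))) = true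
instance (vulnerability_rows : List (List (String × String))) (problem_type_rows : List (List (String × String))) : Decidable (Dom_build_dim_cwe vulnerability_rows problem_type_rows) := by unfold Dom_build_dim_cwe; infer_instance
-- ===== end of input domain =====

-- B replaces A's dict-of-sets aggregation by a per-id rescan of problem_type_rows (no dict at all): shorter and plainer; objective: simpler, not faster.

-- shared helper: the Python expression (row.get(k) or "").strip(), identical in both sources
def pvGetStrip (row : List (String × String)) (k : String) : String :=
  PySem.Str.strip ((PySem.Dict.mk row).getD k "")

-- ===== PORT A =====
def build_dim_cwe (vulnerability_rows : List (List (String × String))) (problem_type_rows : List (List (String × String))) : List (List (String × String)) :=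
  let descriptions_by_cwe : PySem.Dict String (PySem.Set String) :=
    problem_type_rows.foldl (fun d row =>
      let cwe_id := pvGetStrip row "cwe_id"
      let description := pvGetStrip row "description"
      if cwe_id == "" then d
      else
        let d := d.setdefault cwe_id PySem.Set.empty
        if description == "" then d
        else d.modify cwe_id PySem.Set.empty (fun s => PySem.Set.add s description))
      PySem.Dict.empty
  let cwe_ids : PySem.Set String :=
    PySem.Set.ofList (vulnerability_rows.filterMap (fun row =>
      let i := pvGetStrip row "cwe_id"
      if i == "" then none else some i))
  let cwe_ids := PySem.Set.update cwe_ids descriptions_by_cwe.keys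
  (PySem.List.sorted cwe_ids (fun x => x) false).foldl (fun rows cwe_id =>
    let descriptions := PySem.List.sorted (descriptions_by_cwe.getD cwe_id PySem.Set.empty) (fun x => x) false
    rows ++ [[("cwe_key", cwe_id), ("cwe_name", cwe_id),
              ("cwe_description", PySem.Str.join " | " descriptions)]]) []

-- ===== PORT B =====
def build_dim_cwe_alt (vulnerability_rows : List (List (String × String))) (problem_type_rows : List (List (String × String))) : List (List (String × String)) :=
  let ids : PySem.Set String :=
    PySem.Set.discard
      (PySem.Set.union (PySem.Set.ofList (problem_type_rows.map (fun r => pvGetStrip r "cwe_id")))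
                       (PySem.Set.ofList (vulnerability_rows.map (fun r => pvGetStrip r "cwe_id")))) ""
  (PySem.List.sorted ids (fun x => x) false).map (fun cwe_id =>
    let ds : PySem.Set String :=
      PySem.Set.discard
        (PySem.Set.ofList ((problem_type_rows.filter (fun r => pvGetStrip r "cwe_id" == cwe_id)).map
          (fun r => pvGetStrip r "description"))) ""
    [("cwe_key", cwe_id), ("cwe_name", cwe_id),
     ("cwe_description", PySem.Str.join " | " (PySem.List.sorted ds (fun x => x) false))])

-- ===== PRECONDITION & SPEC =====
def Spec_build_dim_cwe (vulnerability_rows : List (List (String × String))) (problem_type_rows : List (List (String × String))) (out : List (List (String × String))) : Prop := out = build_dim_cwe_alt vulnerability_rows problem_type_rows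
instance (vulnerability_rows : List (List (String × String))) (problem_type_rows : List (List (String × String))) (out : List (List (String × String))) : Decidable (Spec_build_dim_cwe vulnerability_rows problem_type_rows out) := by unfold Spec_build_dim_cwe; infer_instance

-- ===== CLAIM (what is proved, stated in full; the proofs are below) =====
def Claim_equal_build_dim_cwe : Prop := ∀ (vulnerability_rows : List (List (String × String))) (problem_type_rows : List (List (String × String))), Dom_build_dim_cwe vulnerability_rows problem_type_rows → Spec_build_dim_cwe vulnerability_rows problem_type_rows (build_dim_cwe vulnerability_rows problem_type_rows)

-- ===== LEMMAS AND PROOFS =====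

def stepA (d : PySem.Dict String (PySem.Set String)) (row : List (String × String)) : PySem.Dict String (PySem.Set String) :=
  let cwe_id := pvGetStrip row "cwe_id"
  let description := pvGetStrip row "description"
  if cwe_id == "" then d
  else
    let d := d.setdefault cwe_id PySem.Set.empty
    if description == "" then d
    else d.modify cwe_id PySem.Set.empty (fun s => PySem.Set.add s description)
def descListA : List (List (String × String)) → String → List String
  | [], _ => []
  | r :: p, x =>
    if pvGetStrip r "cwe_id" == x && !(pvGetStrip r "description" == "") then
      pvGetStrip r "description" :: descListA p x
    else descListA p x

lemma descListA_cons (r : List (String × String)) (p : List (List (String × String))) (x : String) :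
    descListA (r :: p) x
      = if pvGetStrip r "cwe_id" == x && !(pvGetStrip r "description" == "") then
          pvGetStrip r "description" :: descListA p x
        else descListA p x := rfl

lemma getD_setdefault' (d : PySem.Dict String (PySem.Set String)) (k x : String) :
    (d.setdefault k PySem.Set.empty).getD x PySem.Set.empty = d.getD x PySem.Set.empty := by
  by_cases h : x = k
  · subst h; exact PySem.Dict.getD_setdefault_self d x PySem.Set.empty PySem.Set.empty
  · rw [PySem.Dict.getD_eq_get?_getD, PySem.Dict.get?_setdefault_of_ne d _ h, ← PySem.Dict.getD_eq_get?_getD]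

lemma getD_stepA (d : PySem.Dict String (PySem.Set String)) (r : List (String × String)) (x : String) (hx : x ≠ "") :
    (stepA d r).getD x PySem.Set.empty
      = if pvGetStrip r "cwe_id" == x && !(pvGetStrip r "description" == "") then
          PySem.Set.add (d.getD x PySem.Set.empty) (pvGetStrip r "description")
        else d.getD x PySem.Set.empty := by
  unfold stepA
  by_cases h1 : pvGetStrip r "cwe_id" = ""
  · simp [h1, Ne.symm hx]
  · rw [if_neg (by simpa using h1)]
    by_cases h2 : pvGetStrip r "description" = ""
    · rw [if_pos (by simpa using h2), getD_setdefault']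
      simp [h2]
    · rw [if_neg (by simpa using h2), PySem.Dict.getD_modify]
      by_cases hxk : x = pvGetStrip r "cwe_id"
      · subst hxk
        rw [if_pos rfl, getD_setdefault']
        simp [h2]
      · rw [if_neg hxk, getD_setdefault']
        have hcf : (pvGetStrip r "cwe_id" == x && !(pvGetStrip r "description" == "")) = false := by
          simp; intro h; exact absurd h.symm hxk
        rw [hcf]; simp

lemma getD_foldl_stepA (p : List (List (String × String))) (d : PySem.Dict String (PySem.Set String)) (x : String) (hx : x ≠ "") :
    (p.foldl stepA d).getD x PySem.Set.empty
      = PySem.Set.update (d.getD x PySem.Set.empty) (descListA p x) := by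
  induction p generalizing d with
  | nil => simp [descListA, PySem.Set.update]
  | cons r p ih =>
    rw [List.foldl_cons, ih, getD_stepA d r x hx]
    by_cases hc : (pvGetStrip r "cwe_id" == x && !(pvGetStrip r "description" == "")) = true
    · rw [if_pos hc, descListA_cons, if_pos hc, PySem.Set.update_cons]
    · rw [if_neg hc, descListA_cons, if_neg hc]

lemma mem_descListA (p : List (List (String × String))) (x y : String) :
    y ∈ descListA p x ↔ ∃ r ∈ p, pvGetStrip r "cwe_id" = x ∧ pvGetStrip r "description" ≠ "" ∧ y = pvGetStrip r "description" := by
  induction p with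
  | nil => simp [descListA]
  | cons r p ih =>
    rw [descListA_cons]
    split_ifs with hc
    · simp only [Bool.and_eq_true, beq_iff_eq, Bool.not_eq_true', beq_eq_false_iff_ne] at hc
      simp only [List.mem_cons, ih]
      constructor
      · rintro (rfl | ⟨r', hr', h⟩)
        · exact ⟨r, Or.inl rfl, hc.1, hc.2, rfl⟩
        · exact ⟨r', Or.inr hr', h⟩
      · rintro ⟨r', (rfl | hr'), h⟩
        · exact Or.inl h.2.2
        · exact Or.inr ⟨r', hr', h⟩
    · simp only [Bool.and_eq_true, beq_iff_eq, Bool.not_eq_true', beq_eq_false_iff_ne] at hc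
      simp only [List.mem_cons, ih]
      constructor
      · rintro ⟨r', hr', h⟩; exact ⟨r', Or.inr hr', h⟩
      · rintro ⟨r', (rfl | hr'), h⟩
        · exact absurd ⟨h.1, h.2.1⟩ hc
        · exact ⟨r', hr', h⟩

def idsA (v p : List (List (String × String))) : PySem.Set String :=
  PySem.Set.update
    (PySem.Set.ofList (v.filterMap (fun row =>
      let i := pvGetStrip row "cwe_id"
      if i == "" then none else some i)))
    (p.foldl stepA PySem.Dict.empty).keys

def idsB (v p : List (List (String × String))) : PySem.Set String :=
  PySem.Set.discard
    (PySem.Set.union (PySem.Set.ofList (p.map (fun r => pvGetStrip r "cwe_id")))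
                     (PySem.Set.ofList (v.map (fun r => pvGetStrip r "cwe_id")))) ""

lemma mem_keys_stepA (d : PySem.Dict String (PySem.Set String)) (r : List (String × String)) (x : String) :
    x ∈ (stepA d r).keys ↔ x ∈ d.keys ∨ (x ≠ "" ∧ pvGetStrip r "cwe_id" = x) := by
  unfold stepA
  by_cases h1 : pvGetStrip r "cwe_id" = ""
  · simp only [h1, beq_self_eq_true, if_true]
    constructor
    · exact Or.inl
    · rintro (h | ⟨hx, rfl⟩) ; exact h; exact absurd rfl hx
  · rw [if_neg (by simpa using h1)]
    by_cases hc : d.contains (pvGetStrip r "cwe_id") = true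
    · have hks : (d.setdefault (pvGetStrip r "cwe_id") PySem.Set.empty).keys = d.keys := by
        rw [PySem.Dict.keys_setdefault, if_pos hc]
      have hmem := (PySem.Dict.contains_iff_mem_keys d (pvGetStrip r "cwe_id")).mp hc
      by_cases h2 : pvGetStrip r "description" = ""
      · rw [if_pos (by simpa using h2), hks]
        constructor
        · exact Or.inl
        · rintro (h | ⟨hx, rfl⟩); exact h; exact hmem
      · rw [if_neg (by simpa using h2), PySem.Dict.keys_modify]
        rw [PySem.Dict.mem_keys_insert, hks]
        constructor
        · rintro (rfl | h); exact Or.inl hmem; exact Or.inl h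
        · rintro (h | ⟨hx, rfl⟩); exact Or.inr h; exact Or.inl rfl
    · have hks : (d.setdefault (pvGetStrip r "cwe_id") PySem.Set.empty).keys = d.keys ++ [pvGetStrip r "cwe_id"] := by
        rw [PySem.Dict.keys_setdefault, if_neg hc]
      by_cases h2 : pvGetStrip r "description" = ""
      · rw [if_pos (by simpa using h2), hks]
        simp only [List.mem_append, List.mem_singleton]
        constructor
        · rintro (h | rfl); exact Or.inl h; exact Or.inr ⟨h1, rfl⟩
        · rintro (h | ⟨hx, rfl⟩); exact Or.inl h; exact Or.inr rfl
      · rw [if_neg (by simpa using h2), PySem.Dict.keys_modify, PySem.Dict.mem_keys_insert, hks]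
        simp only [List.mem_append, List.mem_singleton]
        constructor
        · rintro (rfl | h | rfl) ; exact Or.inr ⟨h1, rfl⟩; exact Or.inl h; exact Or.inr ⟨h1, rfl⟩
        · rintro (h | ⟨hx, rfl⟩); exact Or.inr (Or.inl h); exact Or.inl rfl

lemma mem_keys_foldl_stepA (p : List (List (String × String))) (d : PySem.Dict String (PySem.Set String)) (x : String) :
    x ∈ (p.foldl stepA d).keys ↔ x ∈ d.keys ∨ (x ≠ "" ∧ ∃ r ∈ p, pvGetStrip r "cwe_id" = x) := by
  induction p generalizing d with
  | nil => simp
  | cons r p ih =>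
    rw [List.foldl_cons, ih, mem_keys_stepA]
    simp only [List.mem_cons]
    constructor
    · rintro ((h | ⟨hx, hr⟩) | ⟨hx, r', hr', hsr⟩)
      · exact Or.inl h
      · exact Or.inr ⟨hx, r, Or.inl rfl, hr⟩
      · exact Or.inr ⟨hx, r', Or.inr hr', hsr⟩
    · rintro (h | ⟨hx, r', (rfl | hr'), hsr⟩)
      · exact Or.inl (Or.inl h)
      · exact Or.inl (Or.inr ⟨hx, hsr⟩)
      · exact Or.inr ⟨hx, r', hr', hsr⟩


lemma mem_idsA_iff_mem_idsB (v p : List (List (String × String))) (a : String) :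
    a ∈ idsA v p ↔ a ∈ idsB v p := by
  unfold idsA idsB
  rw [PySem.Set.mem_update, PySem.Set.mem_discard, PySem.Set.mem_union,
      PySem.Set.mem_ofList, PySem.Set.mem_ofList, PySem.Set.mem_ofList,
      mem_keys_foldl_stepA]
  simp only [PySem.Dict.keys_empty, List.not_mem_nil, false_or, List.mem_filterMap,
    List.mem_map, Option.ite_none_left_eq_some, Option.some.injEq, beq_iff_eq]
  constructor
  · rintro (⟨r, hr, hne, rfl⟩ | ⟨hne, r, hr, hsr⟩)
    · exact ⟨Or.inr ⟨r, hr, rfl⟩, hne⟩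
    · exact ⟨Or.inl ⟨r, hr, hsr⟩, hne⟩
  · rintro ⟨(⟨r, hr, hsr⟩ | ⟨r, hr, hsr⟩), hne⟩
    · exact Or.inr ⟨hne, r, hr, hsr⟩
    · exact Or.inl ⟨r, hr, fun h => hne (hsr ▸ h), hsr⟩

theorem main_eq (v p : List (List (String × String))) : build_dim_cwe v p = build_dim_cwe_alt v p := by
  have hA : build_dim_cwe v p
      = (PySem.List.sorted (idsA v p) (fun x => x) false).foldl (fun rows cwe_id =>
          rows ++ [[("cwe_key", cwe_id), ("cwe_name", cwe_id),
            ("cwe_description", PySem.Str.join " | "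
              (PySem.List.sorted ((p.foldl stepA PySem.Dict.empty).getD cwe_id PySem.Set.empty) (fun x => x) false))]]) [] := rfl
  have hB : build_dim_cwe_alt v p
      = (PySem.List.sorted (idsB v p) (fun x => x) false).map (fun cwe_id =>
          [("cwe_key", cwe_id), ("cwe_name", cwe_id),
           ("cwe_description", PySem.Str.join " | "
             (PySem.List.sorted (PySem.Set.discard (PySem.Set.ofList ((p.filter (fun r => pvGetStrip r "cwe_id" == cwe_id)).map (fun r => pvGetStrip r "description"))) "") (fun x => x) false))]) := rfl
  rw [hA, hB, PySem.List.foldl_append_singleton_eq_map, List.nil_append]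
  have ndA : (idsA v p).Nodup := PySem.Set.nodup_update _ _ (PySem.Set.nodup_ofList _)
  have ndB : (idsB v p).Nodup :=
    PySem.Set.nodup_discard _ _ (PySem.Set.nodup_union _ _ (PySem.Set.nodup_ofList _))
  have hids : PySem.List.sorted (idsA v p) (fun x => x) false
      = PySem.List.sorted (idsB v p) (fun x => x) false :=
    PySem.List.sorted_eq_sorted_of_perm _ _ _ (fun a b h => h)
      ((List.perm_ext_iff_of_nodup ndA ndB).mpr (mem_idsA_iff_mem_idsB v p))
  rw [hids]
  apply List.map_congr_left
  intro cid hcid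
  have hne : cid ≠ "" := by
    rw [PySem.List.mem_sorted] at hcid
    exact ((PySem.Set.mem_discard _ _ _).mp hcid).2
  have hdesc : PySem.List.sorted ((p.foldl stepA PySem.Dict.empty).getD cid PySem.Set.empty) (fun x => x) false
      = PySem.List.sorted (PySem.Set.discard (PySem.Set.ofList ((p.filter (fun r => pvGetStrip r "cwe_id" == cid)).map (fun r => pvGetStrip r "description"))) "") (fun x => x) false := by
    rw [getD_foldl_stepA p PySem.Dict.empty cid hne, PySem.Dict.getD_empty,
        PySem.Set.update_empty]
    apply PySem.List.sorted_eq_sorted_of_perm _ _ _ (fun a b h => h)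
    rw [List.perm_ext_iff_of_nodup (PySem.Set.nodup_ofList _)
      (PySem.Set.nodup_discard _ _ (PySem.Set.nodup_ofList _))]
    intro y
    rw [PySem.Set.mem_ofList, PySem.Set.mem_discard, PySem.Set.mem_ofList, mem_descListA]
    simp only [List.mem_map, List.mem_filter, beq_iff_eq]
    constructor
    · rintro ⟨r, hr, hsr, hd, rfl⟩
      exact ⟨⟨r, ⟨hr, hsr⟩, rfl⟩, hd⟩
    · rintro ⟨⟨r, ⟨hr, hsr⟩, rfl⟩, hd⟩
      exact ⟨r, hr, hsr, hd, rfl⟩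
  rw [hdesc]

-- ===== VERDICT (by name: the statement is the Claim_ definition above) =====
theorem build_dim_cwe_spec : Claim_equal_build_dim_cwe := by
  intro v p _
  unfold Spec_build_dim_cwe
  exact main_eq v p
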